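-- pv_equiv track=rewrite | github.com/zgy0813/paper_polish_analyst | src/core/official_guide_parser.py | _categorize_rules
-- ===== SOURCE A (Python) =====
-- from typing import Dict, List
--
-- def _categorize_rules(rules: List[Dict]) -> Dict[str, List[Dict]]:
--     """
--     对规则进行分类
--
--     Args:
--         rules: 规则列表
--
--     Returns:
--         按类别分组的规则字典
--     """
--     categories = {}
--
--     for rule in rules:
--         category = rule.get("category", "其他")
--         if category not in categories:
--             categories[category] = []
--         categories[category].append(rule)
--
--     return categories
-- ===== SOURCE B (Python) =====
-- def _categorize_rules(rules):
--     """Group rules by category: collect the distinct categories in first-appearance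
--     order, then build each group with one filtering pass per category."""
--     order = list(dict.fromkeys(r.get("category", "其他") for r in rules))
--     return {c: [r for r in rules if r.get("category", "其他") == c] for c in order}
-- ===== Notes on version B (the rewrite author's own statement) =====
-- stated objective: alternative
-- what changed: Replaces A's single-pass dict accumulator (membership check + in-place append per rule) by a two-phase decomposition: ordered dedup of the category keys via dict.fromkeys, then one filtering comprehension per category; key order and the appended rule objects are identical.
import Mathlib
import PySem

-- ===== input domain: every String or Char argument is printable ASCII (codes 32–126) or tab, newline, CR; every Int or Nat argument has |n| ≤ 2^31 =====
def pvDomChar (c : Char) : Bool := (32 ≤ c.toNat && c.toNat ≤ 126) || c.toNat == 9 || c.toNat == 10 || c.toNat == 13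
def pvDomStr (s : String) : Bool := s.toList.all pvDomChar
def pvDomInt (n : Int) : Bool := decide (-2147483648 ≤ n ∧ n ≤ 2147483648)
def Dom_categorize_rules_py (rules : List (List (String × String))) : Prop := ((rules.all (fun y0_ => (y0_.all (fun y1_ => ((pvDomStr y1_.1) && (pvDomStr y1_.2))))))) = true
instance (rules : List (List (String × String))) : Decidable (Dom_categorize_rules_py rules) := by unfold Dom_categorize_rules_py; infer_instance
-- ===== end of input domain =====

-- B replaces A's growing dict-with-membership-check accumulator by two passes
-- (ordered dedup of the category keys, then one filter per category); objective:
-- alternative decomposition, same result including key order.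

-- rule.get("category", "其他"): a rule is a dict (assoc list under the type
-- convention), so look it up through PySem.Dict (duplicate keys: last value wins,
-- as in Python's dict). Used by both ports.
def pvKey (r : List (String × String)) : String :=
  (PySem.Dict.ofList r).getD "category" "其他"

-- ===== PORT A =====
def categorize_rules_py (rules : List (List (String × String))) : List (String × List (List (String × String))) :=
  (rules.foldl
    (fun cats rule =>
      let category := pvKey rule
      let cats1 := if cats.contains category then cats else cats.insert category []
      -- categories[category].append(rule)
      cats1.modify category [] (fun l => l ++ [rule]))
    PySem.Dict.empty).items

-- ===== PORT B =====
def categorize_rules_py_alt (rules : List (List (String × String))) : List (String × List (List (String × String))) :=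
  let order := PySem.List.dedup (rules.map (fun r => pvKey r))   -- list(dict.fromkeys(…))
  -- the dict comprehension runs over the DISTINCT keys of `order`, so every key is
  -- fresh and the resulting dict's items are exactly these pairs in this order
  order.map (fun c => (c, rules.filter (fun r => pvKey r == c)))

-- ===== PRECONDITION & SPEC =====
def Spec_categorize_rules_py (rules : List (List (String × String))) (out : List (String × List (List (String × String)))) : Prop := out = categorize_rules_py_alt rules
instance (rules : List (List (String × String))) (out : List (String × List (List (String × String)))) : Decidable (Spec_categorize_rules_py rules out) := by unfold Spec_categorize_rules_py; infer_instance

-- ===== CLAIM (what is proved, stated in full; the proofs are below) =====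
def Claim_equal_categorize_rules_py : Prop := ∀ (rules : List (List (String × String))), Dom_categorize_rules_py rules → Spec_categorize_rules_py rules (categorize_rules_py rules)

-- ===== LEMMAS AND PROOFS =====

-- A's loop body (ensure the key, then append) is exactly one Dict.modify.
theorem pv_stepA_eq (cats : PySem.Dict String (List (List (String × String))))
    (rule : List (String × String)) :
    (let category := pvKey rule
     let cats1 := if cats.contains category then cats else cats.insert category []
     cats1.modify category [] (fun l => l ++ [rule]))
    = cats.modify (pvKey rule) [] (fun l => l ++ [rule]) := by
  by_cases h : cats.contains (pvKey rule)
  · simp [h]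
  · simp only [h, if_neg, Bool.not_eq_true, PySem.Dict.modify,
      PySem.Dict.getD_insert_self, PySem.Dict.insert_insert_self]
    rw [PySem.Dict.getD_of_not_contains]
    simpa using h

theorem categorize_rules_py_eq_alt (rules : List (List (String × String))) :
    categorize_rules_py rules = categorize_rules_py_alt rules := by
  unfold categorize_rules_py categorize_rules_py_alt
  have hfold : rules.foldl
      (fun cats rule =>
        let category := pvKey rule
        let cats1 := if cats.contains category then cats else cats.insert category []
        cats1.modify category [] (fun l => l ++ [rule]))
      PySem.Dict.empty
      = rules.foldl (fun cats rule => cats.modify (pvKey rule) [] (fun l => l ++ [rule]))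
          PySem.Dict.empty := by
    congr 1
    funext cats rule
    exact pv_stepA_eq cats rule
  rw [hfold]
  set D := rules.foldl (fun cats rule => cats.modify (pvKey rule) [] (fun l => l ++ [rule]))
      PySem.Dict.empty with hD
  have hkeys : D.keys = PySem.Set.ofList (rules.map (fun r => pvKey r)) := by
    rw [hD, PySem.Dict.keys_foldl_modify_key rules (fun r => pvKey r) []
      (fun _ rule => fun l => l ++ [rule]) PySem.Dict.empty]
    simp [PySem.Dict.keys_empty, PySem.Set.update_nil_left]
  have hnodup : D.keys.Nodup := by
    rw [hkeys]; exact PySem.Set.nodup_ofList _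
  have hgetD : ∀ c, D.getD c [] = rules.filter (fun r => pvKey r == c) := by
    intro c
    have hmap : D = (rules.map (fun r => (pvKey r, r))).foldl
        (fun d p => d.modify p.1 [] (fun l => l ++ [p.2])) PySem.Dict.empty := by
      rw [hD, List.foldl_map]
    rw [hmap, PySem.Dict.getD_foldl_modify_append]
    simp [List.filter_map, Function.comp_def]
  rw [PySem.Dict.items_eq_map_keys D hnodup [], hkeys, PySem.List.dedup_eq_ofList]
  exact List.map_congr_left (fun c _ => by rw [hgetD c])

-- ===== VERDICT (by name: the statement is the Claim_ definition above) =====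
theorem categorize_rules_py_spec : Claim_equal_categorize_rules_py := by
  intro rules _
  unfold Spec_categorize_rules_py
  exact categorize_rules_py_eq_alt rules
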